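-- pv_equiv track=rewrite | github.com/dKriszti15/ANPR | complete_anpr.py | apply_county_filter
-- ===== SOURCE A (Python) =====
-- COUNTY_CODES = sorted(
--     [
--         "AB", "AR", "AG", "BC", "BH", "BN", "BT", "BV", "BR", "B",
--         "CL", "CS", "CJ", "CT", "CV", "DB", "DJ", "GL", "GR", "GJ",
--         "HR", "HD", "IL", "IS", "IF", "MM", "MH", "MS", "NT", "OT",
--         "PH", "SJ", "SM", "SB", "SV", "TR", "TM", "TL", "VS", "VL", "VN",
--     ],
--     key=len,
--     reverse=True,
-- )
--
-- def apply_county_filter(text):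
--     for i in range(len(text)):
--         chunk = text[i:]
--         for code in COUNTY_CODES:
--             if chunk.startswith(code):
--                 remainder = chunk[len(code):]
--                 if remainder and remainder[0].isdigit():
--                     return chunk
--     return text
-- ===== SOURCE B (Python) =====
-- COUNTY_CODES = sorted(
--     [
--         "AB", "AR", "AG", "BC", "BH", "BN", "BT", "BV", "BR", "B",
--         "CL", "CS", "CJ", "CT", "CV", "DB", "DJ", "GL", "GR", "GJ",
--         "HR", "HD", "IL", "IS", "IF", "MM", "MH", "MS", "NT", "OT",
--         "PH", "SJ", "SM", "SB", "SV", "TR", "TM", "TL", "VS", "VL", "VN",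
--     ],
--     key=len,
--     reverse=True,
-- )
--
-- def apply_county_filter(text):
--     # Code-outer search: for each county code, walk its occurrences with
--     # str.find and keep the earliest position followed by a digit.
--     best = None
--     for code in COUNTY_CODES:
--         pos = text.find(code)
--         while pos != -1:
--             j = pos + len(code)
--             if j < len(text) and text[j].isdigit():
--                 if best is None or pos < best:
--                     best = pos
--             pos = text.find(code, pos + 1)
--     return text if best is None else text[best:]
-- ===== Notes on version B (the rewrite author's own statement) =====
-- stated objective: faster
-- what changed: Replaced A's position-outer scan (each text position tested with startswith against every county code) by a code-outer search that walks each code's occurrences with str.find(code, pos) and keeps the running minimum matching position.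
import Mathlib
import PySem

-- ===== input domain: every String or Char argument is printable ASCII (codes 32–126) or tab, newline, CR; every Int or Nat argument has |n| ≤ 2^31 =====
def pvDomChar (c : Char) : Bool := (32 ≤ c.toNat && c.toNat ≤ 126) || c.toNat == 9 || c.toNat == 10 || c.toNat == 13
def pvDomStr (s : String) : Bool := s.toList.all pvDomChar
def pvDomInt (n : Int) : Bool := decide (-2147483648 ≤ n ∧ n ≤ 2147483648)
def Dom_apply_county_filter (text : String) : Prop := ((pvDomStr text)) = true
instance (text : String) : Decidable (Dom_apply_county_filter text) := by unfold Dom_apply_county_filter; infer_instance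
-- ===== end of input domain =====

-- B replaces A's position-outer startswith scan by a code-outer str.find occurrence walk keeping a running minimum position; same return value, alternative algorithm.

-- ===== PORT A =====
-- COUNTY_CODES = sorted([...], key=len, reverse=True)
def pvCodesRaw : List (List Char) :=
  [ "AB".toList, "AR".toList, "AG".toList, "BC".toList, "BH".toList, "BN".toList, "BT".toList, "BV".toList, "BR".toList, "B".toList,
    "CL".toList, "CS".toList, "CJ".toList, "CT".toList, "CV".toList, "DB".toList, "DJ".toList, "GL".toList, "GR".toList, "GJ".toList,
    "HR".toList, "HD".toList, "IL".toList, "IS".toList, "IF".toList, "MM".toList, "MH".toList, "MS".toList, "NT".toList, "OT".toList,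
    "PH".toList, "SJ".toList, "SM".toList, "SB".toList, "SV".toList, "TR".toList, "TM".toList, "TL".toList, "VS".toList, "VL".toList, "VN".toList ]

def COUNTY_CODES : List (List Char) := PySem.List.sorted pvCodesRaw (fun c => c.length) true

-- "remainder and remainder[0].isdigit()"
def pvHeadDigit : List Char → Bool
  | [] => false
  | d :: _ => PySem.Chars.isdigit d

-- the inner 'for code in COUNTY_CODES' loop of A
def pvAInner (chunk : List Char) : List (List Char) → Option (List Char)
  | [] => none
  | code :: rest =>
    if PySem.Chars.startswith chunk code then
      if pvHeadDigit (chunk.drop code.length) then some chunk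
      else pvAInner chunk rest
    else pvAInner chunk rest

-- the outer 'for i in range(len(text))' loop of A; text[i:] with 0 ≤ i < len is List.drop i
def pvAOuter (t : List Char) : List Nat → Option (List Char)
  | [] => none
  | i :: rest =>
    match pvAInner (t.drop i) COUNTY_CODES with
    | some c => some c
    | none => pvAOuter t rest

def apply_county_filter (text : String) : String :=
  match pvAOuter text.toList (List.range text.toList.length) with
  | some c => String.ofList c
  | none => text

-- ===== PORT B =====
-- "j < len(text) and text[j].isdigit()" (t[j]? = none exactly when j is out of range)
def pvDigitAt (t : List Char) (j : Nat) : Bool :=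
  match t[j]? with
  | some d => PySem.Chars.isdigit d
  | none => false

-- the 'while pos != -1' occurrence walk of B for one code; fuel only makes the loop
-- structurally recursive (positions strictly increase, so length+1 steps always suffice)
def pvOcc (t code : List Char) (fuel : Nat) (start : Nat) (best : Option Nat) : Option Nat :=
  match fuel with
  | 0 => best
  | fuel + 1 =>
    let pos := PySem.Chars.findFrom t code (start : Int) none
    if pos = -1 then best
    else
      let p := pos.toNat
      let best' :=
        if pvDigitAt t (p + code.length) then
          match best with
          | none => some p
          | some b => if p < b then some p else some b
        else best
      pvOcc t code fuel (p + 1) best'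

def apply_county_filter_alt (text : String) : String :=
  let t := text.toList
  match COUNTY_CODES.foldl (fun b code => pvOcc t code (t.length + 1) 0 b) none with
  | some p => String.ofList (t.drop p)
  | none => text

-- ===== PRECONDITION & SPEC =====
def Spec_apply_county_filter (text : String) (out : String) : Prop := out = apply_county_filter_alt text
instance (text : String) (out : String) : Decidable (Spec_apply_county_filter text out) := by unfold Spec_apply_county_filter; infer_instance

-- ===== CLAIM (what is proved, stated in full; the proofs are below) =====
def Claim_equal_apply_county_filter : Prop := ∀ (text : String), Dom_apply_county_filter text → Spec_apply_county_filter text (apply_county_filter text)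

-- ===== LEMMAS AND PROOFS =====

-- the match condition at position p: some code occurrence at p followed by a digit
def pvCond (chunk code : List Char) : Bool :=
  PySem.Chars.startswith chunk code && pvHeadDigit (chunk.drop code.length)

def pvHit (t code : List Char) (p : Nat) : Bool := pvCond (t.drop p) code

-- running minimum on Option Nat
def pvMin : Option Nat → Option Nat → Option Nat
  | none, o => o
  | some b, none => some b
  | some b, some p => some (min b p)

-- least position ≥ s (in range) where code hits
def pvLeast (t code : List Char) (s : Nat) : Option Nat :=
  (List.range t.length).find? (fun p => decide (s ≤ p) && pvHit t code p)

-- "o is the least p < n with q p" spelled out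
def pvIsLeast (n : Nat) (q : Nat → Bool) (o : Option Nat) : Prop :=
  match o with
  | none => ∀ p < n, q p = false
  | some m => m < n ∧ q m = true ∧ ∀ p < m, q p = false

theorem pvFindRange_isLeast (n : Nat) (q : Nat → Bool) : pvIsLeast n q ((List.range n).find? q) := by
  induction n with
  | zero => intro p hp; omega
  | succ n ih =>
    rw [List.range_succ, List.find?_append]
    rcases h : (List.range n).find? q with _ | m
    · rw [h] at ih
      rcases hq : List.find? q [n] with _ | m'
      · simp only [Option.or_none]
        intro p hp
        rcases Nat.lt_succ_iff_lt_or_eq.mp hp with h' | rfl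
        · exact ih p h'
        · cases hqp : q p with
          | false => rfl
          | true => simp [List.find?, hqp] at hq
      · simp only [Option.or_some]
        have hm' : m' = n := by simpa using List.mem_of_find?_eq_some hq
        subst hm'
        exact ⟨Nat.lt_succ_self m', List.find?_some hq, fun p hp => ih p hp⟩
    · rw [h] at ih
      simp only [Option.or]
      exact ⟨Nat.lt_succ_of_lt ih.1, ih.2.1, ih.2.2⟩

theorem pvIsLeast_unique {n : Nat} {q : Nat → Bool} {o₁ o₂ : Option Nat}
    (h₁ : pvIsLeast n q o₁) (h₂ : pvIsLeast n q o₂) : o₁ = o₂ := by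
  match o₁, o₂ with
  | none, none => rfl
  | none, some m => exact absurd h₂.2.1 (by simp [h₁ m h₂.1])
  | some m, none => exact absurd h₁.2.1 (by simp [h₂ m h₁.1])
  | some m₁, some m₂ =>
    rcases Nat.lt_trichotomy m₁ m₂ with h | h | h
    · exact absurd h₁.2.1 (by simp [h₂.2.2 m₁ h])
    · simp [h]
    · exact absurd h₂.2.1 (by simp [h₁.2.2 m₂ h])

theorem pvMin_isLeast {n : Nat} {q₁ q₂ : Nat → Bool} {o₁ o₂ : Option Nat}
    (h₁ : pvIsLeast n q₁ o₁) (h₂ : pvIsLeast n q₂ o₂) :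
    pvIsLeast n (fun p => q₁ p || q₂ p) (pvMin o₁ o₂) := by
  match o₁, o₂ with
  | none, none => intro p hp; simp [h₁ p hp, h₂ p hp]
  | none, some m =>
    exact ⟨h₂.1, by simp [h₂.2.1], fun p hp => by simp [h₂.2.2 p hp, h₁ p (hp.trans h₂.1)]⟩
  | some m, none =>
    exact ⟨h₁.1, by simp [h₁.2.1], fun p hp => by simp [h₁.2.2 p hp, h₂ p (hp.trans h₁.1)]⟩
  | some m₁, some m₂ =>
    refine ⟨lt_of_le_of_lt (min_le_left _ _) h₁.1, ?_, fun p hp => ?_⟩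
    · rcases Nat.le_total m₁ m₂ with h | h
      · simp [Nat.min_eq_left h, h₁.2.1]
      · simp [Nat.min_eq_right h, h₂.2.1]
    · have hp1 : p < m₁ := lt_of_lt_of_le hp (min_le_left _ _)
      have hp2 : p < m₂ := lt_of_lt_of_le hp (min_le_right _ _)
      simp [h₁.2.2 p hp1, h₂.2.2 p hp2]

theorem pvAInner_eq (chunk : List Char) (codes : List (List Char)) :
    pvAInner chunk codes = if codes.any (fun c => pvCond chunk c) then some chunk else none := by
  induction codes with
  | nil => simp [pvAInner]
  | cons c rest ih =>
    simp only [pvAInner, List.any_cons, pvCond]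
    by_cases h1 : PySem.Chars.startswith chunk c
    · by_cases h2 : pvHeadDigit (chunk.drop c.length) <;> simp [h1, h2, ih, pvCond]
    · simp [h1, ih, pvCond]

theorem pvAOuter_eq (t : List Char) (l : List Nat) :
    pvAOuter t l = (l.find? (fun i => COUNTY_CODES.any (fun c => pvHit t c i))).map (fun i => t.drop i) := by
  induction l with
  | nil => simp [pvAOuter]
  | cons i rest ih =>
    simp only [pvHit] at ih ⊢
    by_cases h : (COUNTY_CODES.any fun c => pvCond (List.drop i t) c) = true
    · simp only [pvAOuter, pvAInner_eq, h, if_pos]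
      rw [List.find?_cons_of_pos (p := fun i => COUNTY_CODES.any fun c => pvCond (List.drop i t) c) (l := rest) h]
      rfl
    · simp only [pvAOuter, pvAInner_eq, h, if_neg, Bool.not_eq_true]
      rw [List.find?_cons_of_neg (p := fun i => COUNTY_CODES.any fun c => pvCond (List.drop i t) c) (l := rest) h]
      simpa using ih

theorem pvHit_eq (t code : List Char) (p : Nat) :
    pvHit t code p = (PySem.Chars.startswith (t.drop p) code && pvDigitAt t (p + code.length)) := by
  have hd : pvHeadDigit ((t.drop p).drop code.length) = pvDigitAt t (p + code.length) := by
    have h1 : (t.drop p).drop code.length = t.drop (p + code.length) := by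
      rw [List.drop_drop]
    rw [h1]
    have h2 : (t.drop (p + code.length)).head? = t[p + code.length]? := List.head?_drop
    unfold pvDigitAt
    cases hx : t.drop (p + code.length) with
    | nil =>
      rw [hx] at h2; simp only [List.head?_nil] at h2
      rw [pvHeadDigit, ← h2]
    | cons d rest =>
      rw [hx] at h2; simp only [List.head?_cons] at h2
      rw [pvHeadDigit, ← h2]
  rw [pvHit, pvCond, hd]

theorem pvCodes_ne_nil : ∀ c ∈ COUNTY_CODES, c ≠ [] := by decide

theorem pvOcc_eq (t code : List Char) (hc : code ≠ []) :
    ∀ (fuel s : Nat) (best : Option Nat), s ≤ t.length → t.length + 1 - s ≤ fuel →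
      pvOcc t code fuel s best = pvMin best (pvLeast t code s) := by
  intro fuel
  induction fuel with
  | zero => intro s best hs hf; omega
  | succ fuel ih =>
    intro s best hs hf
    rw [pvOcc]
    by_cases hpos : PySem.Chars.findFrom t code (s : Int) none = -1
    · rw [if_pos hpos]
      have hninf : ¬ code <:+: t.drop s := (PySem.Chars.findFrom_natCast_eq_neg_one_iff t code s hs).mp hpos
      have hnone : pvLeast t code s = none := by
        apply List.find?_eq_none.mpr
        intro p hp
        simp only [Bool.and_eq_true, decide_eq_true_eq, not_and]
        intro hsp
        rw [pvHit_eq]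
        simp only [Bool.and_eq_true, not_and]
        intro hsw
        exfalso
        apply hninf
        have hpre : code <+: t.drop p := (PySem.Chars.startswith_iff _ _).mp hsw
        have hdd : (t.drop s).drop (p - s) = t.drop p := by
          rw [List.drop_drop]; congr 1; omega
        exact hpre.isInfix.trans (hdd ▸ (List.drop_suffix (p - s) (t.drop s)).isInfix)
      rw [hnone]
      cases best <;> rfl
    · rw [if_neg hpos]
      obtain ⟨hge, hpre, hmin⟩ := PySem.Chars.findFrom_natCast_spec t code s hs hpos
      set pos := PySem.Chars.findFrom t code (s : Int) none with hposdef
      have hps : s ≤ pos.toNat := by omega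
      have hlc : 0 < code.length := by cases code with | nil => exact absurd rfl hc | cons a l => simp
      have hlen : pos.toNat + code.length ≤ t.length := by
        have := hpre.length_le
        rw [List.length_drop] at this
        omega
      have hplt : pos.toNat < t.length := by omega
      have hsw : PySem.Chars.startswith (t.drop pos.toNat) code = true := (PySem.Chars.startswith_iff _ _).mpr hpre
      by_cases hd : pvDigitAt t (pos.toNat + code.length) = true
      · have hhit : pvHit t code pos.toNat = true := by rw [pvHit_eq, hsw, hd]; rfl
        have hL : pvLeast t code s = some pos.toNat := by
          apply pvIsLeast_unique (pvFindRange_isLeast _ _)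
          refine ⟨hplt, by simp [hps, hhit], fun q hq => ?_⟩
          by_cases hq2 : s ≤ q
          · have hnp : ¬ code <+: t.drop q := hmin q hq2 hq
            have hsw0 : PySem.Chars.startswith (t.drop q) code = false := by
              cases hx : PySem.Chars.startswith (t.drop q) code
              · rfl
              · exact absurd ((PySem.Chars.startswith_iff _ _).mp hx) hnp
            simp [pvHit_eq, hsw0]
          · simp [hq2]
        have hbest' : (if pvDigitAt t (pos.toNat + code.length) then
            match best with
            | none => some pos.toNat
            | some b => if pos.toNat < b then some pos.toNat else some b
          else best) = pvMin best (some pos.toNat) := by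
          rw [if_pos hd]
          cases best with
          | none => rfl
          | some b =>
            simp only [pvMin]
            split <;> [skip; skip] <;> congr 1 <;> omega
        dsimp only
        rw [hbest', ih _ _ (by omega) (by omega), hL]
        rcases hL2 : pvLeast t code (pos.toNat + 1) with _ | q
        · cases best <;> rfl
        · have := pvFindRange_isLeast t.length (fun p => decide (pos.toNat + 1 ≤ p) && pvHit t code p)
          rw [show ((List.range t.length).find? fun p => decide (pos.toNat + 1 ≤ p) && pvHit t code p) = some q from hL2] at this
          have hq : pos.toNat + 1 ≤ q := by
            have := this.2.1
            simp only [Bool.and_eq_true, decide_eq_true_eq] at this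
            exact this.1
          cases best with
          | none => simp [pvMin]; omega
          | some b => simp [pvMin]; omega
      · have hhit : pvHit t code pos.toNat = false := by
          rw [pvHit_eq]
          simp [Bool.eq_false_iff.mpr hd]
        have hbest' : (if pvDigitAt t (pos.toNat + code.length) then
            match best with
            | none => some pos.toNat
            | some b => if pos.toNat < b then some pos.toNat else some b
          else best) = best := by rw [if_neg hd]
        dsimp only
        rw [hbest', ih _ _ (by omega) (by omega)]
        have hLL : pvLeast t code (pos.toNat + 1) = pvLeast t code s := by
          apply pvIsLeast_unique (n := t.length) (q := fun p => decide (s ≤ p) && pvHit t code p)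
          · have hch := pvFindRange_isLeast t.length (fun p => decide (pos.toNat + 1 ≤ p) && pvHit t code p)
            rcases hL2 : pvLeast t code (pos.toNat + 1) with _ | m
            · rw [show ((List.range t.length).find? fun p => decide (pos.toNat + 1 ≤ p) && pvHit t code p) = none from hL2] at hch
              intro q hqn
              by_cases h1 : s ≤ q
              · by_cases h2 : q ≤ pos.toNat
                · by_cases h3 : q = pos.toNat
                  · subst h3; simp [hhit]
                  · have hnp : ¬ code <+: t.drop q := hmin q h1 (by omega)
                    have hsw0 : PySem.Chars.startswith (t.drop q) code = false := by
                      cases hx : PySem.Chars.startswith (t.drop q) code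
                      · rfl
                      · exact absurd ((PySem.Chars.startswith_iff _ _).mp hx) hnp
                    simp [pvHit_eq, hsw0]
                · have hge2 : pos.toNat + 1 ≤ q := by omega
                  have h5 := hch q hqn
                  simp [hge2] at h5
                  simp [h5]
              · simp [h1]
            · rw [show ((List.range t.length).find? fun p => decide (pos.toNat + 1 ≤ p) && pvHit t code p) = some m from hL2] at hch
              obtain ⟨hmlt, hmq, hmmin⟩ := hch
              simp only [Bool.and_eq_true, decide_eq_true_eq] at hmq
              refine ⟨hmlt, by simp [hmq.2]; omega, fun q hq => ?_⟩
              by_cases h1 : s ≤ q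
              · by_cases h2 : q ≤ pos.toNat
                · by_cases h3 : q = pos.toNat
                  · subst h3; simp [hhit]
                  · have hnp : ¬ code <+: t.drop q := hmin q h1 (by omega)
                    have hsw0 : PySem.Chars.startswith (t.drop q) code = false := by
                      cases hx : PySem.Chars.startswith (t.drop q) code
                      · rfl
                      · exact absurd ((PySem.Chars.startswith_iff _ _).mp hx) hnp
                    simp [pvHit_eq, hsw0]
                · have hge2 : pos.toNat + 1 ≤ q := by omega
                  have h5 := hmmin q hq
                  simp [hge2] at h5
                  simp [h5]
              · simp [h1]
          · exact pvFindRange_isLeast _ _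
        rw [hLL]

theorem pvMin_assoc (a b c : Option Nat) : pvMin (pvMin a b) c = pvMin a (pvMin b c) := by
  cases a <;> cases b <;> cases c <;> simp [pvMin, Nat.min_assoc]

theorem pvFold_eq (t : List Char) (cs : List (List Char)) (hcs : ∀ c ∈ cs, c ≠ []) (b : Option Nat) :
    cs.foldl (fun b code => pvOcc t code (t.length + 1) 0 b) b
      = pvMin b ((List.range t.length).find? (fun p => cs.any (fun c => pvHit t c p))) := by
  induction cs generalizing b with
  | nil =>
    simp only [List.foldl_nil, List.any_nil]
    rw [List.find?_eq_none.mpr (by simp)]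
    cases b <;> rfl
  | cons c cs ih =>
    simp only [List.foldl_cons]
    rw [pvOcc_eq t c (hcs c (by simp)) _ 0 b (by omega) (by omega)]
    rw [ih (fun c hx => hcs c (by simp [hx]))]
    have h0 : pvLeast t c 0 = (List.range t.length).find? (fun p => pvHit t c p) := by
      simp [pvLeast]
    have hcomb : pvMin ((List.range t.length).find? (fun p => pvHit t c p))
        ((List.range t.length).find? (fun p => cs.any (fun c => pvHit t c p)))
        = (List.range t.length).find? (fun p => (c :: cs).any (fun c => pvHit t c p)) := by
      apply pvIsLeast_unique (n := t.length)
        (q := fun p => pvHit t c p || cs.any (fun c => pvHit t c p))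
      · exact pvMin_isLeast (pvFindRange_isLeast _ _) (pvFindRange_isLeast _ _)
      · have := pvFindRange_isLeast t.length (fun p => (c :: cs).any (fun c => pvHit t c p))
        simpa [List.any_cons] using this
    rw [h0, pvMin_assoc, hcomb]

-- ===== VERDICT (by name: the statement is the Claim_ definition above) =====
theorem apply_county_filter_spec : Claim_equal_apply_county_filter := by
  intro text _
  unfold Spec_apply_county_filter apply_county_filter apply_county_filter_alt
  dsimp only
  rw [pvAOuter_eq, pvFold_eq _ _ pvCodes_ne_nil]
  rcases h : (List.range text.toList.length).find? (fun i => COUNTY_CODES.any fun c => pvHit text.toList c i) with _ | i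
  · simp [pvMin]
  · simp [pvMin]
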